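-- pv_equiv track=rewrite | github.com/svgbogdnn/algorithms-data-structures-IDAS_course- | 3 term/[CONTEST] 3 'ИСАД АиСД-1 2526. ДЗ 2. Хеш-функции'/5.py | ChampagnePapi21
-- ===== SOURCE A (Python) =====
-- def longliveDrizzy(a, b):
--     la = len(a)
--     lb = len(b)
--     if la >= lb:
--         return False
--
--     i = 0
--     while i < la:
--         if a[i] != b[i]:
--             return False
--         i = i + 1
--     return True
--
-- def ChampagnePapi21(words, seq):
--     k = len(seq)
--     if k == 0:
--         return (1, 1)
--
--     best_len = 1
--     best_l = 1
--     best_r = 1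
--     cur_l = 1
--     cur_len = 1
--
--     i = 0
--     while i < k - 1:
--         a_idx = seq[i]
--         b_idx = seq[i + 1]
--         a = words[a_idx]
--         b = words[b_idx]
--         ok = longliveDrizzy(a, b)
--
--         if ok:
--             cur_len = cur_len + 1
--             if cur_len > best_len:
--                 best_len = cur_len
--                 best_l = cur_l
--                 best_r = i + 2
--
--         else:
--             cur_l = i + 2
--             cur_len = 1
--
--         i = i + 1
--
--     return (best_l, best_r)
-- ===== SOURCE B (Python) =====
-- def ChampagnePapi21(words, seq):
--     k = len(seq)
--     # table pass: ok[i] says pair (seq[i], seq[i+1]) is a strict-prefix step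
--     ok = [len(words[seq[i]]) < len(words[seq[i + 1]])
--           and words[seq[i + 1]].startswith(words[seq[i]])
--           for i in range(k - 1)]
--     # run scan: leftmost longest maximal run of True, jumping run by run
--     n = len(ok)
--     best_m = 0
--     best_s = 0
--     i = 0
--     while i < n:
--         if ok[i]:
--             j = i + 1
--             while j < n and ok[j]:
--                 j += 1
--             if j - i > best_m:
--                 best_m = j - i
--                 best_s = i
--             i = j
--         else:
--             i += 1
--     if best_m == 0:
--         return (1, 1)
--     return (best_s + 1, best_s + best_m + 1)
-- ===== Notes on version B (the rewrite author's own statement) =====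
-- stated objective: alternative
-- what changed: A fuses lookup, run tracking and best update into one loop carrying five state variables; B first materializes a boolean table over adjacent pairs (length-compare + startswith instead of a char-by-char helper), then finds the leftmost longest True run by jumping run-by-run with an inner scan, mapping the winning run back to 1-indexed boundaries at the end.
import Mathlib
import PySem

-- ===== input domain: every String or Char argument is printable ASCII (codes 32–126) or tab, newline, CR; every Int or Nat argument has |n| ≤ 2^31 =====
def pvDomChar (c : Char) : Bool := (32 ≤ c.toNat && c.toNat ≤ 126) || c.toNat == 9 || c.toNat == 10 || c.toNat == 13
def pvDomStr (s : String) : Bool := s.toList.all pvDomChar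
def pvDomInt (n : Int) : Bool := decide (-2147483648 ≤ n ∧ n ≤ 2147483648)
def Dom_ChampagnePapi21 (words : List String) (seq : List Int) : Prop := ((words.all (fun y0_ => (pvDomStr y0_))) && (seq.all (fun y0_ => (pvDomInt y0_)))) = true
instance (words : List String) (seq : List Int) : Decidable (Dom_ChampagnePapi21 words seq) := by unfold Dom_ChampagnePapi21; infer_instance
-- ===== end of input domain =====

-- B replaces A's fused five-variable loop by a boolean table over adjacent pairs plus a
-- run-by-run leftmost-longest-run scan (objective: alternative decomposition, same cost).

-- ===== PORT A =====
-- port of longliveDrizzy's char-comparison while loop (index i walking a; exact: Python never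
-- reads out of range here because the loop is only reached when len(a) < len(b))
def longliveDrizzyAux : List Char → List Char → Bool
  | [], _ => true
  | _ :: _, [] => true
  | x :: xs, y :: ys => if x ≠ y then false else longliveDrizzyAux xs ys

def longliveDrizzy (a b : String) : Bool :=
  if PySem.Str.len a ≥ PySem.Str.len b then false
  else longliveDrizzyAux a.toList b.toList

-- one iteration of A's while loop; state = (best_len, best_l, best_r, cur_l, cur_len)
def cp21Step (words : List String) (seq : List Int) (st : Int × Int × Int × Int × Int)
    (i : Int) : Int × Int × Int × Int × Int :=
  match st with
  | (bl, bL, bR, cl, cn) =>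
    let a_idx := PySem.List.pyGetD seq i 0
    let b_idx := PySem.List.pyGetD seq (i + 1) 0
    let a := PySem.List.pyGetD words a_idx ""
    let b := PySem.List.pyGetD words b_idx ""
    if longliveDrizzy a b then
      let cn' := cn + 1
      if cn' > bl then (cn', cl, i + 2, cl, cn') else (bl, bL, bR, cl, cn')
    else (bl, bL, bR, i + 2, 1)

def ChampagnePapi21 (words : List String) (seq : List Int) : Int × Int :=
  let k := PySem.List.len seq
  if k = 0 then (1, 1)
  else
    let st := (PySem.List.pyRange 0 (k - 1) 1).foldl (cp21Step words seq) (1, 1, 1, 1, 1)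
    (st.2.1, st.2.2.1)

-- ===== PORT B =====
-- ok[i] of B's table comprehension
def okEntry (words : List String) (seq : List Int) (i : Int) : Bool :=
  let a := PySem.List.pyGetD words (PySem.List.pyGetD seq i 0) ""
  let b := PySem.List.pyGetD words (PySem.List.pyGetD seq (i + 1) 0) ""
  decide (PySem.Str.len a < PySem.Str.len b) && PySem.Str.startswith b a

-- B's inner while loop: how far the current True run extends
def runLen : List Bool → Nat
  | true :: rest => runLen rest + 1
  | _ => 0

-- B's outer while loop, jumping run by run; best = (best_m, best_s)
def scanB : List Bool → Int → Int × Int → Int × Int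
  | [], _, best => best
  | x :: rest, i, (m, s) =>
    if x then
      let r : Int := 1 + (runLen rest : Int)
      let best' := if r > m then (r, i) else (m, s)
      scanB (rest.drop (runLen rest)) (i + r) best'
    else scanB rest (i + 1) (m, s)
termination_by l => l.length
decreasing_by
  · simp only [List.length_drop, List.length_cons]; omega
  · simp

def ChampagnePapi21_alt (words : List String) (seq : List Int) : Int × Int :=
  let k := PySem.List.len seq
  let ok := (PySem.List.pyRange 0 (k - 1) 1).map (okEntry words seq)
  let best := scanB ok 0 (0, 0)
  if best.1 = 0 then (1, 1) else (best.2 + 1, best.2 + best.1 + 1)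

-- ===== PRECONDITION & SPEC =====
-- Pre_ excludes exactly the inputs on which A raises IndexError: a seq of length ≥ 2
-- containing an index out of range for words (each element is looked up then).
def Pre_ChampagnePapi21 (words : List String) (seq : List Int) : Prop :=
  seq.length ≤ 1 ∨ ∀ x ∈ seq, PySem.Raise.InRange words.length x

instance (words : List String) (seq : List Int) : Decidable (Pre_ChampagnePapi21 words seq) := by
  unfold Pre_ChampagnePapi21; infer_instance

def pvWitness_ChampagnePapi21 : List String × List Int := (["a", "ab", "b"], [0, 1, 2])

def Spec_ChampagnePapi21 (words : List String) (seq : List Int) (out : Int × Int) : Prop :=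
  out = ChampagnePapi21_alt words seq
instance (words : List String) (seq : List Int) (out : Int × Int) :
    Decidable (Spec_ChampagnePapi21 words seq out) := by unfold Spec_ChampagnePapi21; infer_instance

-- ===== CLAIM (what is proved, stated in full; the proofs are below) =====
def Claim_equal_ChampagnePapi21 : Prop := ∀ (words : List String) (seq : List Int),
  Dom_ChampagnePapi21 words seq → Pre_ChampagnePapi21 words seq →
  Spec_ChampagnePapi21 words seq (ChampagnePapi21 words seq)

-- ===== LEMMAS AND PROOFS =====

-- longliveDrizzy decides "a is a prefix of b"
lemma llDAux_eq_decide_prefix : ∀ (x y : List Char), x.length ≤ y.length →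
    longliveDrizzyAux x y = decide (x <+: y) := by
  intro x
  induction x with
  | nil => intro y _; simp [longliveDrizzyAux]
  | cons a xs ih =>
    intro y hy
    cases y with
    | nil => simp at hy
    | cons b ys =>
      simp only [longliveDrizzyAux, List.cons_prefix_cons]
      by_cases hab : a = b
      · subst hab
        simp [ih ys (by simpa using hy)]
      · simp [hab]

-- A's helper equals B's "strictly shorter and startswith" table entry shape
lemma llD_eq_okShape (a b : String) :
    longliveDrizzy a b
      = (decide (PySem.Str.len a < PySem.Str.len b) && PySem.Str.startswith b a) := by
  rw [Bool.eq_iff_iff]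
  unfold longliveDrizzy
  by_cases h : PySem.Str.len a ≥ PySem.Str.len b
  · simp only [if_pos h, Bool.false_eq_true, false_iff, Bool.and_eq_true, decide_eq_true_eq]
    intro ⟨h1, _⟩; omega
  · have hlen : a.toList.length ≤ b.toList.length := by
      have := not_le.mp h
      simp only [PySem.Str.len_eq] at this
      omega
    rw [if_neg h, llDAux_eq_decide_prefix _ _ hlen]
    have hlt : a.length < b.length := by
      have := not_le.mp h
      simp only [PySem.Str.len_eq, String.length_toList] at this
      omega
    simp [PySem.Chars.startswith_iff, hlt]

-- list-level form of A's loop (proof helper): the loop body applied to precomputed booleans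
def loopA : List Bool → Int → Int × Int × Int × Int × Int → Int × Int × Int × Int × Int
  | [], _, st => st
  | o :: rest, i, (bl, bL, bR, cl, cn) =>
    if o then
      if cn + 1 > bl then loopA rest (i + 1) (cn + 1, cl, i + 2, cl, cn + 1)
      else loopA rest (i + 1) (bl, bL, bR, cl, cn + 1)
    else loopA rest (i + 1) (bl, bL, bR, i + 2, 1)

-- A's fold over the index range is loopA over the precomputed table
lemma foldl_eq_loopA (words : List String) (seq : List Int) :
    ∀ (n : Nat) (a b : Int), (b - a).toNat = n → ∀ st,
    (PySem.List.pyRange a b 1).foldl (cp21Step words seq) st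
      = loopA ((PySem.List.pyRange a b 1).map (okEntry words seq)) a st := by
  intro n
  induction n with
  | zero =>
    intro a b hab st
    rw [PySem.List.pyRange_one_eq_nil (by omega)]
    rfl
  | succ n ih =>
    intro a b hab st
    rw [PySem.List.pyRange_one_cons (by omega)]
    obtain ⟨bl, bL, bR, cl, cn⟩ := st
    simp only [List.foldl_cons, List.map_cons]
    rw [ih (a + 1) b (by omega)]
    show loopA _ (a + 1) (cp21Step words seq (bl, bL, bR, cl, cn) a) = _
    rw [loopA]
    simp only [cp21Step, llD_eq_okShape, okEntry]
    split_ifs <;> rfl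

-- effect of loopA on a block of q+1 consecutive True entries
lemma loopA_run : ∀ (q : Nat) (tail : List Bool) (i bl bL bR cl cn : Int),
    loopA (List.replicate (q + 1) true ++ tail) i (bl, bL, bR, cl, cn)
      = loopA tail (i + (q : Int) + 1)
          (if cn + (q : Int) + 1 > bl then (cn + q + 1, cl, i + q + 2, cl, cn + q + 1)
           else (bl, bL, bR, cl, cn + q + 1)) := by
  intro q
  induction q with
  | zero =>
    intro tail i bl bL bR cl cn
    rw [List.replicate_succ, List.replicate_zero, List.cons_append, List.nil_append, loopA]
    norm_num
    split_ifs <;> rfl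
  | succ q ih =>
    intro tail i bl bL bR cl cn
    rw [List.replicate_succ, List.cons_append, loopA]
    simp only [if_true]
    by_cases h1 : cn + 1 > bl
    · rw [if_pos h1, ih]
      congr 1
      · push_cast; ring
      · push_cast; split_ifs <;> simp [Prod.ext_iff] <;> omega
    · rw [if_neg h1, ih]
      congr 1
      · push_cast; ring
      · push_cast; split_ifs <;> simp [Prod.ext_iff] <;> omega

lemma runLen_decomp : ∀ l : List Bool,
    List.replicate (runLen l) true ++ l.drop (runLen l) = l := by
  intro l
  induction l with
  | nil => rfl
  | cons x rest ih =>
    cases x with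
    | true => simp only [runLen, List.replicate_succ, List.cons_append, List.drop_succ_cons]
              exact congrArg _ ih
    | false => rfl

lemma head_drop_runLen : ∀ (l t : List Bool), l.drop (runLen l) ≠ true :: t := by
  intro l
  induction l with
  | nil => intro t h; simp at h
  | cons x rest ih =>
    intro t
    cases x with
    | true => simpa [runLen] using ih t
    | false => simp [runLen]

-- A's loop state corresponding to B's best pair (m, s) at position i
def stAB (m s i : Int) : Int × Int × Int × Int × Int :=
  (m + 1, if m = 0 then 1 else s + 1, if m = 0 then 1 else s + m + 1, i + 1, 1)

-- B's final mapping of the best run back to word boundaries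
def finAB : Int × Int → Int × Int :=
  fun p => if p.1 = 0 then (1, 1) else (p.2 + 1, p.2 + p.1 + 1)

lemma loopA_eq_scanB : ∀ (n : Nat) (ok : List Bool), ok.length ≤ n → ∀ (i m s : Int), 0 ≤ m →
    ((loopA ok i (stAB m s i)).2.1, (loopA ok i (stAB m s i)).2.2.1)
      = finAB (scanB ok i (m, s)) := by
  intro n
  induction n with
  | zero =>
    intro ok hlen i m s hm
    have : ok = [] := by cases ok <;> simp_all
    subst this
    simp [loopA, scanB, stAB, finAB]
    split_ifs with h <;> simp
  | succ n ih =>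
    intro ok hlen i m s hm
    match ok with
    | [] =>
      simp [loopA, scanB, stAB, finAB]
      split_ifs with h <;> simp
    | false :: rest =>
      rw [scanB]
      simp only [if_neg (by simp : ¬ (false = true))]
      have hst : loopA (false :: rest) i (stAB m s i) = loopA rest (i + 1) (stAB m s (i + 1)) := by
        rw [stAB, loopA]
        simp only [Bool.false_eq_true, if_false, stAB]
        ring_nf
      rw [hst]
      exact ih rest (by simp at hlen ⊢; omega) (i + 1) m s hm
    | true :: ok' =>
      rw [scanB]
      simp only [if_true]
      set r := runLen ok' with hr
      -- decompose the leading True run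
      have hdec : List.replicate (r + 1) true ++ ok'.drop r = true :: ok' := by
        have := runLen_decomp (true :: ok')
        simpa [runLen, hr, List.replicate_succ] using this
      have hL : loopA (true :: ok') i (stAB m s i)
          = loopA (ok'.drop r) (i + (r : Int) + 1)
              (if 1 + (r : Int) + 1 > m + 1
               then (1 + r + 1, i + 1, i + r + 2, i + 1, 1 + r + 1)
               else (m + 1, if m = 0 then 1 else s + 1, if m = 0 then 1 else s + m + 1, i + 1, 1 + r + 1)) := by
        rw [← hdec, stAB, loopA_run]
      rw [hL]
      rcases hdrop : ok'.drop r with _ | ⟨b, t⟩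
      · -- the run reaches the end of the table
        rw [hdrop] at *
        simp only [loopA, scanB]
        rw [finAB]
        split_ifs <;> simp_all <;> omega
      · -- the run is followed by a False entry
        have hb : b = false := by
          cases b
          · rfl
          · exfalso
            exact head_drop_runLen (true :: ok') t (by simpa [runLen, hr, hdrop])
        subst hb
        have hstep : ∀ st5 : Int × Int × Int × Int × Int,
            loopA (false :: t) (i + (r : Int) + 1) st5
              = loopA t (i + r + 2) (st5.1, st5.2.1, st5.2.2.1, i + r + 3, 1) := by
          intro ⟨a1, a2, a3, a4, a5⟩
          rw [loopA]
          norm_num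
          congr 1
          · ring
          · simp only [Prod.ext_iff]
            norm_num
            ring
        rw [hstep]
        have hT : scanB (false :: t) (i + (1 + (r : Int)))
              (if 1 + (r : Int) > m then (1 + r, i) else (m, s))
            = scanB t (i + r + 2) (if 1 + (r : Int) > m then (1 + r, i) else (m, s)) := by
          rw [scanB]
          norm_num
          congr 1
          ring
        rw [hT]
        have hstate : ((if 1 + (r : Int) + 1 > m + 1
               then ((1 + (r:Int) + 1, i + 1, i + r + 2, i + 1, 1 + r + 1) : Int × Int × Int × Int × Int)
               else (m + 1, if m = 0 then 1 else s + 1, if m = 0 then 1 else s + m + 1, i + 1, 1 + r + 1)).1,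
              (if 1 + (r : Int) + 1 > m + 1
               then ((1 + (r:Int) + 1, i + 1, i + r + 2, i + 1, 1 + r + 1) : Int × Int × Int × Int × Int)
               else (m + 1, if m = 0 then 1 else s + 1, if m = 0 then 1 else s + m + 1, i + 1, 1 + r + 1)).2.1,
              (if 1 + (r : Int) + 1 > m + 1
               then ((1 + (r:Int) + 1, i + 1, i + r + 2, i + 1, 1 + r + 1) : Int × Int × Int × Int × Int)
               else (m + 1, if m = 0 then 1 else s + 1, if m = 0 then 1 else s + m + 1, i + 1, 1 + r + 1)).2.2.1,
              i + (r:Int) + 3, (1:Int))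
            = stAB (if 1 + (r : Int) > m then 1 + r else m) (if 1 + (r : Int) > m then i else s) (i + r + 2) := by
          rw [stAB]
          split_ifs <;> simp [Prod.ext_iff] <;> omega
        have hlt : t.length ≤ n := by
          have h1 : ok'.length ≤ n := by simp at hlen; omega
          have h2 : (ok'.drop r).length = t.length + 1 := by rw [hdrop]; simp
          simp at h2; omega
        have hm' : 0 ≤ (if 1 + (r : Int) > m then 1 + (r:Int) else m) := by
          split_ifs <;> omega
        have := ih t hlt (i + r + 2)
          (if 1 + (r : Int) > m then 1 + (r:Int) else m)
          (if 1 + (r : Int) > m then i else s) hm'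
        rw [hstate]
        convert this using 3 <;> split_ifs <;> simp

-- ===== VERDICT (by name: the statement is the Claim_ definition above) =====
theorem ChampagnePapi21_spec : Claim_equal_ChampagnePapi21 := by
  intro words seq _ _
  unfold Spec_ChampagnePapi21 ChampagnePapi21 ChampagnePapi21_alt
  simp only []
  by_cases hk : PySem.List.len seq = 0
  · rw [if_pos hk, hk]
    rw [PySem.List.pyRange_one_eq_nil (by omega)]
    simp [scanB]
  · rw [if_neg hk]
    rw [foldl_eq_loopA words seq (PySem.List.len seq - 1).toNat 0 (PySem.List.len seq - 1)
      (by omega) _]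
    have h0 : ((1:Int),(1:Int),(1:Int),(1:Int),(1:Int)) = stAB 0 0 0 := by norm_num [stAB]
    rw [h0]
    exact loopA_eq_scanB
      ((PySem.List.pyRange 0 (PySem.List.len seq - 1) 1).map (okEntry words seq)).length
      ((PySem.List.pyRange 0 (PySem.List.len seq - 1) 1).map (okEntry words seq)) le_rfl
      0 0 0 le_rfl
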